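-- pv_equiv track=rewrite | github.com/mmalarz/google-competitions | problem-a-2014.py | get_possibly_broken_segments
-- ===== SOURCE A (Python) =====
-- def get_possibly_broken_segments(number_list):
--     """
--     Gets all switched off segments that are common for all the digits.
--     """
--     empty_segments = list()
--     number_count = len(number_list)
--
--     for number_string in number_list:
--         for position, char in enumerate(number_string):
--             if char == '0':
--                 empty_segments.append(position)
--
--     return {
--         segment for segment in empty_segments
--         if empty_segments.count(segment) == number_count
--     }
-- ===== SOURCE B (Python) =====
-- def get_possibly_broken_segments(number_list):
--     if not number_list:
--         return set()
--     result = {p for p, c in enumerate(number_list[0]) if c == '0'}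
--     for s in number_list[1:]:
--         result &= {p for p, c in enumerate(s) if c == '0'}
--     return result
-- ===== Notes on version B (the rewrite author's own statement) =====
-- stated objective: simpler
-- what changed: Replaces A's flat multiset of zero positions with a quadratic list.count filter by a direct intersection of per-string zero-position sets.
import Mathlib
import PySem

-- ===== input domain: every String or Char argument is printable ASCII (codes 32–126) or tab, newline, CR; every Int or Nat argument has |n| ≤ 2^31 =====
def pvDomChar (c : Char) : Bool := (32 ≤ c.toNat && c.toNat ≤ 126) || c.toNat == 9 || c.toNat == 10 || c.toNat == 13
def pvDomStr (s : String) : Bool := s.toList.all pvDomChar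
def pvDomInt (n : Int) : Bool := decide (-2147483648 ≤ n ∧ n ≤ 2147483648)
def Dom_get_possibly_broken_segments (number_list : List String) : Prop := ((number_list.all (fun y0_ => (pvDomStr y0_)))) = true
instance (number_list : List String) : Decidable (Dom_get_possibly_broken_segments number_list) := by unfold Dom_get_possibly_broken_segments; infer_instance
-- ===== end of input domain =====

-- B intersects per-string zero-position sets instead of A's count-filter over the flat multiset of positions.

-- ===== PORT A =====
def get_possibly_broken_segments (number_list : List String) : List Int :=
  let number_count : Int := number_list.length
  let empty_segments : List Int :=
    number_list.foldl (fun acc number_string =>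
      (PySem.List.enumerate number_string.toList 0).foldl
        (fun acc pc => if pc.2 = '0' then acc ++ [pc.1] else acc) acc) []
  PySem.Set.ofList (empty_segments.filter (fun segment =>
    (empty_segments.count segment : Int) == number_count))

-- ===== PORT B =====
-- the set comprehension {p for p, c in enumerate(s) if c == '0'}
def pvZeroSet (s : String) : PySem.Set Int :=
  PySem.Set.ofList ((PySem.List.enumerate s.toList 0).filterMap
    (fun pc => if pc.2 = '0' then some pc.1 else none))

def get_possibly_broken_segments_alt (number_list : List String) : List Int :=
  match number_list with
  | [] => PySem.Set.empty
  | s :: rest => rest.foldl (fun r t => PySem.Set.inter r (pvZeroSet t)) (pvZeroSet s)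

-- ===== PRECONDITION & SPEC =====
def Spec_get_possibly_broken_segments (number_list : List String) (out : List Int) : Prop := out = get_possibly_broken_segments_alt number_list
instance (number_list : List String) (out : List Int) : Decidable (Spec_get_possibly_broken_segments number_list out) := by unfold Spec_get_possibly_broken_segments; infer_instance

-- ===== CLAIM (what is proved, stated in full; the proofs are below) =====
def Claim_equal_get_possibly_broken_segments : Prop := ∀ (number_list : List String), Dom_get_possibly_broken_segments number_list → Spec_get_possibly_broken_segments number_list (get_possibly_broken_segments number_list)

-- ===== LEMMAS AND PROOFS =====

-- the raw (in-order) list of zero positions of a string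
def pvZraw (s : String) : List Int :=
  (PySem.List.enumerate s.toList 0).filterMap (fun pc => if pc.2 = '0' then some pc.1 else none)

theorem pv_filterMap_nodup (l : List (Int × Char))
    (h : l.Pairwise (fun p q => p.1 < q.1)) :
    (l.filterMap (fun pc => if pc.2 = '0' then some pc.1 else none)).Nodup := by
  induction l with
  | nil => simp
  | cons p l ih =>
    rcases List.pairwise_cons.mp h with ⟨hp, hl⟩
    simp only [List.filterMap_cons]
    split
    · exact ih hl
    · rename_i b heq
      refine List.Nodup.cons ?_ (ih hl)
      intro hmem
      rcases List.mem_filterMap.mp hmem with ⟨q, hq, hq2⟩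
      have hpq := hp q hq
      have hb : p.1 = b := by
        by_cases h0 : p.2 = '0' <;> simp [h0] at heq
        exact heq
      have hqb : q.1 = b := by
        by_cases h0 : q.2 = '0' <;> simp [h0] at hq2
        exact hq2
      omega

theorem pvZraw_nodup (s : String) : (pvZraw s).Nodup :=
  pv_filterMap_nodup _ (PySem.List.pairwise_lt_enumerate s.toList 0)

theorem pvZeroSet_eq (s : String) : pvZeroSet s = pvZraw s :=
  PySem.Set.ofList_eq_self_of_nodup _ (pvZraw_nodup s)

theorem pv_inner_foldl (l : List (Int × Char)) (acc : List Int) :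
    l.foldl (fun acc pc => if pc.2 = '0' then acc ++ [pc.1] else acc) acc
      = acc ++ l.filterMap (fun pc => if pc.2 = '0' then some pc.1 else none) := by
  induction l generalizing acc with
  | nil => simp
  | cons p l ih =>
    simp only [List.foldl_cons, List.filterMap_cons]
    by_cases h : p.2 = '0' <;> simp [h, ih]

theorem pv_outer_foldl (l : List String) (acc : List Int) :
    l.foldl (fun acc s =>
      (PySem.List.enumerate s.toList 0).foldl
        (fun acc pc => if pc.2 = '0' then acc ++ [pc.1] else acc) acc) acc
      = acc ++ l.flatMap pvZraw := by
  induction l generalizing acc with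
  | nil => simp
  | cons s l ih =>
    rw [List.foldl_cons, pv_inner_foldl, ih, List.flatMap_cons, ← List.append_assoc]
    rfl

theorem pv_count_flatMap (x : Int) (l : List String) :
    (l.flatMap pvZraw).count x = l.countP (fun t => decide (x ∈ pvZraw t)) := by
  induction l with
  | nil => simp
  | cons s l ih =>
    simp only [List.flatMap_cons, List.count_append, List.countP_cons, ih]
    by_cases h : x ∈ pvZraw s
    · simp [h, List.count_eq_one_of_mem (pvZraw_nodup s) h, Nat.add_comm]
    · simp [h, List.count_eq_zero_of_not_mem h]

-- count = length ↔ the position is a zero of every string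
theorem pv_count_iff (x : Int) (l : List String) :
    ((l.flatMap pvZraw).count x = l.length) ↔ ∀ t ∈ l, x ∈ pvZraw t := by
  rw [pv_count_flatMap]
  constructor
  · intro h t ht
    have := List.countP_eq_length.mp h t ht
    simpa using this
  · intro h
    exact List.countP_eq_length.mpr (fun t ht => by simpa using h t ht)

-- B's loop is a filter by membership in every remaining string's zero set
theorem pv_alt_foldl (rest : List String) (r : List Int) :
    rest.foldl (fun r t => PySem.Set.inter r (pvZeroSet t)) r
      = r.filter (fun x => rest.all (fun t => decide (x ∈ pvZraw t))) := by
  induction rest generalizing r with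
  | nil => simp
  | cons t rest ih =>
    rw [List.foldl_cons, ih]
    simp only [PySem.Set.inter, pvZeroSet_eq, List.filter_filter]
    apply List.filter_congr
    intro x _
    simp [PySem.Set.contains, Bool.and_comm]

-- dropping the appended part of the flat list: everything that survives the filter is already in the head block
theorem pv_ofList_absorb (a b : List Int) (ha : a.Nodup) (hb : ∀ x ∈ b, x ∈ a) :
    PySem.Set.ofList (a ++ b) = a := by
  rw [PySem.Set.ofList_append, PySem.Set.ofList_eq_self_of_nodup _ ha,
    PySem.Set.update_eq_append_filter]
  have : List.filter (fun y => !PySem.Set.contains a y) (PySem.Set.ofList b) = [] := by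
    apply List.filter_eq_nil_iff.mpr
    intro y hy
    have : y ∈ a := hb y ((PySem.Set.mem_ofList b y).mp hy)
    simp [PySem.Set.contains, this]
  rw [this, List.append_nil]

-- ===== VERDICT (by name: the statement is the Claim_ definition above) =====
theorem get_possibly_broken_segments_spec : Claim_equal_get_possibly_broken_segments := by
  intro number_list _
  show get_possibly_broken_segments number_list = get_possibly_broken_segments_alt number_list
  cases number_list with
  | nil => rfl
  | cons s rest =>
    unfold get_possibly_broken_segments get_possibly_broken_segments_alt
    simp only [pv_outer_foldl, List.nil_append]
    rw [pv_alt_foldl, pvZeroSet_eq]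
    set L := (s :: rest).flatMap pvZraw with hL
    set n : Int := ((s :: rest).length : Int) with hn
    have hpred : ∀ x : Int, ((L.count x : Int) == n) = true ↔ ∀ t ∈ s :: rest, x ∈ pvZraw t := by
      intro x
      rw [beq_iff_eq, hn]
      constructor
      · intro h; exact (pv_count_iff x (s :: rest)).mp (by exact_mod_cast h)
      · intro h; exact_mod_cast (pv_count_iff x (s :: rest)).mpr h
    have hLsplit : L = pvZraw s ++ rest.flatMap pvZraw := by simp [hL]
    rw [hLsplit, List.filter_append]
    rw [pv_ofList_absorb]
    · apply List.filter_congr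
      intro x hx
      apply Bool.eq_iff_iff.mpr
      constructor
      · intro h
        have := (hpred x).mp (by simpa [hLsplit] using h)
        simp only [List.all_eq_true]
        exact fun t ht => decide_eq_true (this t (List.mem_cons_of_mem s ht))
      · intro h
        have hall : ∀ t ∈ s :: rest, x ∈ pvZraw t := by
          intro t ht
          rcases List.mem_cons.mp ht with rfl | ht'
          · exact hx
          · simpa using (List.all_eq_true.mp h t ht')
        simpa [hLsplit] using (hpred x).mpr hall
    · exact (pvZraw_nodup s).filter _
    · intro x hx
      rcases List.mem_filter.mp hx with ⟨hxm, hxp⟩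
      have := (hpred x).mp (by simpa [hLsplit] using hxp)
      exact List.mem_filter.mpr ⟨this s (List.mem_cons_self), by simpa [hLsplit] using hxp⟩
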